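-- pv_equiv track=rewrite | github.com/joeljohansson99/adventofcode | 2024/src/day15.py | step_left
-- ===== SOURCE A (Python) =====
-- def step_left(pos, stones, walls):
-- 	s_pos = (pos[0], pos[1]-1, pos[1])
-- 	if pos in walls:
-- 		return (False, stones)
-- 	elif s_pos in stones:
-- 		(can, new_stones) = step_left((s_pos[0], s_pos[1]-1), stones.copy(), walls)
-- 		if can:
-- 			new_stones[stones.index(s_pos)] = (s_pos[0], s_pos[1]-1, s_pos[2]-1)
-- 			return (can, new_stones)
-- 		else:
-- 			return False, stones
-- 	else:
-- 		return (True, stones)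
-- ===== SOURCE B (Python) =====
-- def step_left(pos, stones, walls):
--     x, y = pos[0], pos[1]
--     if pos in walls:
--         return (False, stones)
--     first = {}
--     for i, s in enumerate(stones):
--         if s not in first:
--             first[s] = i
--     cur = y
--     while (x, cur - 1, cur) in first:
--         cur -= 2
--         if (x, cur) in walls:
--             return (False, stones)
--     new_stones = list(stones)
--     while cur < y:
--         new_stones[first[(x, cur + 1, cur + 2)]] = (x, cur, cur + 1)
--         cur += 2
--     return (True, new_stones)
-- ===== Notes on version B (the rewrite author's own statement) =====
-- stated objective: alternative
-- what changed: replaces A's per-level recursion, which copies the stone list and rescans it with `in` and `.index` at every level, by a first-index dict built once, a single leftward while-scan, and one in-place shift loop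
import Mathlib
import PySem

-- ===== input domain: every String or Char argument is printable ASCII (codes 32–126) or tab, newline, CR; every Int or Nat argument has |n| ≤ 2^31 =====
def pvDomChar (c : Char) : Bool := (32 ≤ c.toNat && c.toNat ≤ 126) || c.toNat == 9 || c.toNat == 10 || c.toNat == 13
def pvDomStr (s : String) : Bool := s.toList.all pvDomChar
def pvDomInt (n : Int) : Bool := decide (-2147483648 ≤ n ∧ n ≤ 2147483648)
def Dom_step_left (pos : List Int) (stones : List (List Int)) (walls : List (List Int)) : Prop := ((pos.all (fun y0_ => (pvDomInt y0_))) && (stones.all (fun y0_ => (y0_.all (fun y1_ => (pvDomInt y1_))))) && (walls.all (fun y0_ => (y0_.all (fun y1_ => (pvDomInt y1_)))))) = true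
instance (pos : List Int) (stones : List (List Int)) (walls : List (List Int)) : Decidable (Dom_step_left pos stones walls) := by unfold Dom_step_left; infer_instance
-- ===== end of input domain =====

-- B replaces A's per-level recursion (with its list copy, `in` scan and `.index` scan at every
-- level) by a first-index dictionary built once, a single leftward scan, and one shift loop.

-- ===== PORT A =====
-- Literal transliteration of A.  The recursion depth of the Python is at most the number of
-- distinct stones (each level consumes a distinct chain element of `stones`), so the fuel
-- `stones.length + 1` is a pure totality guard: it is never exhausted on any input.
def step_left_fuel : Nat → List Int → List (List Int) → List (List Int) → Bool × List (List Int)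
  | 0, _, stones, _ => (false, stones)
  | f + 1, pos, stones, walls =>
    match pos with
    | x :: y :: _ =>
      -- s_pos = (pos[0], pos[1]-1, pos[1])
      let s_pos : List Int := [x, y - 1, y]
      if walls.contains pos then (false, stones)
      else if stones.contains s_pos then
        -- recursive call on (s_pos[0], s_pos[1]-1) = (x, y-2); stones.copy() is pure here
        let r := step_left_fuel f [x, y - 2] stones walls
        if r.1 then
          match PySem.List.index? stones s_pos with
          | some i => (true, r.2.set i [x, y - 2, y - 1])
          | none => (false, stones)   -- unreachable: s_pos ∈ stones in this branch
        else (false, stones)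
      else (true, stones)
    | _ => (false, stones)   -- pos shorter than 2: Python raises IndexError (outside Pre_)

def step_left (pos : List Int) (stones : List (List Int)) (walls : List (List Int)) : Bool × List (List Int) :=
  step_left_fuel (stones.length + 1) pos stones walls

-- ===== PORT B =====
-- first = {}; for i, s in enumerate(stones): if s not in first: first[s] = i
def pvFirstIdx (stones : List (List Int)) : PySem.Dict (List Int) Int :=
  (PySem.List.enumerate stones).foldl
    (fun d p => if d.contains p.2 then d else d.insert p.2 p.1) PySem.Dict.empty

-- the `while (x, cur-1, cur) in first:` scan; fuel `stones.length + 1` is a totality guard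
-- (the scanned keys are distinct keys of `first`, so the loop runs at most `size first` times)
def pvScan (first : PySem.Dict (List Int) Int) (walls : List (List Int)) (x : Int) :
    Nat → Int → Option Int
  | 0, _ => none
  | f + 1, cur =>
    if first.contains [x, cur - 1, cur] then
      if walls.contains [x, cur - 2] then none
      else pvScan first walls x f (cur - 2)
    else some cur

-- body of `while cur < y:` — new_stones[first[(x,cur+1,cur+2)]] = (x, cur, cur+1)
def pvShiftStep (first : PySem.Dict (List Int) Int) (x : Int) (ns : List (List Int)) (cur : Int) : List (List Int) :=
  match first.get? [x, cur + 1, cur + 2] with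
  | some i => ns.set i.toNat [x, cur, cur + 1]   -- i ≥ 0: a list index; .toNat is exact
  | none => ns   -- unreachable when called: the scan loop guarantees the key is present

-- fuel `stones.length + 1` is again a pure totality guard: the loop runs once per chain
-- element found by the scan, i.e. at most `size first` times
def pvShift (first : PySem.Dict (List Int) Int) (x : Int) :
    Nat → List (List Int) → Int → Int → List (List Int)
  | 0, ns, _, _ => ns
  | f + 1, ns, cur, y =>
    if cur < y then pvShift first x f (pvShiftStep first x ns cur) (cur + 2) y else ns

def step_left_alt (pos : List Int) (stones : List (List Int)) (walls : List (List Int)) : Bool × List (List Int) :=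
  match pos with
  | x :: y :: _ =>
    if walls.contains pos then (false, stones)
    else
      let first := pvFirstIdx stones
      match pvScan first walls x (stones.length + 1) y with
      | none => (false, stones)
      | some cur => (true, pvShift first x (stones.length + 1) stones cur y)
  | _ => (false, stones)   -- pos shorter than 2: Python raises IndexError (outside Pre_)

-- ===== PRECONDITION & SPEC =====
-- Pre_ excludes exactly the inputs where A raises: pos[0]/pos[1] raise IndexError on len(pos) < 2.
def Pre_step_left (pos : List Int) (stones : List (List Int)) (walls : List (List Int)) : Prop :=
  2 ≤ pos.length
instance (pos : List Int) (stones : List (List Int)) (walls : List (List Int)) : Decidable (Pre_step_left pos stones walls) := by unfold Pre_step_left; infer_instance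

def pvWitness_step_left : List Int × List (List Int) × List (List Int) :=
  ([2, 5], [[2, 4, 5], [2, 2, 3]], [[2, 0]])

def Spec_step_left (pos : List Int) (stones : List (List Int)) (walls : List (List Int)) (out : Bool × List (List Int)) : Prop := out = step_left_alt pos stones walls
instance (pos : List Int) (stones : List (List Int)) (walls : List (List Int)) (out : Bool × List (List Int)) : Decidable (Spec_step_left pos stones walls out) := by unfold Spec_step_left; infer_instance

-- ===== CLAIM (what is proved, stated in full; the proofs are below) =====
def Claim_equal_step_left : Prop := ∀ (pos : List Int) (stones : List (List Int)) (walls : List (List Int)), Dom_step_left pos stones walls → Pre_step_left pos stones walls → Spec_step_left pos stones walls (step_left pos stones walls)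

-- ===== LEMMAS AND PROOFS =====

-- appending a fresh element does not change the first index of anything else
theorem index?_append_single (xs : List (List Int)) (s v : List Int) (h : v ∈ xs ∨ v ≠ s) :
    PySem.List.index? (xs ++ [s]) v = PySem.List.index? xs v := by
  by_cases hv : v ∈ xs
  · exact PySem.List.index?_append_of_mem _ hv
  · have hvs : v ≠ s := h.resolve_left hv
    rw [(PySem.List.index?_eq_none_iff _ _).mpr hv,
        (PySem.List.index?_eq_none_iff _ _).mpr (by simp [hv, hvs])]

-- the first-index dictionary computes exactly list.index (first occurrence)
theorem pvFirstIdx_get? (stones : List (List Int)) : ∀ (v : List Int),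
    (pvFirstIdx stones).get? v = (PySem.List.index? stones v).map Int.ofNat := by
  induction stones using List.reverseRecOn with
  | nil =>
    intro v
    simp [pvFirstIdx, PySem.List.enumerate_nil, PySem.Dict.get?_empty,
      PySem.List.index?_eq_idxOf?]
  | append_singleton xs s ih =>
    intro v
    have hstep : pvFirstIdx (xs ++ [s]) =
        (if (pvFirstIdx xs).contains s then pvFirstIdx xs
         else (pvFirstIdx xs).insert s ((0 : Int) + xs.length)) := by
      simp [pvFirstIdx, PySem.List.enumerate_append, PySem.List.enumerate_cons,
        PySem.List.enumerate_nil, List.foldl_append]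
    have hcm : (pvFirstIdx xs).contains s = true ↔ s ∈ xs := by
      rw [PySem.Dict.contains_eq_isSome_get?, ih s]
      simp [PySem.List.index?_isSome_iff]
    rw [hstep]
    by_cases hs : s ∈ xs
    · rw [if_pos (hcm.mpr hs), ih v,
        index?_append_single xs s v (by by_cases hv : v ∈ xs <;> simp_all; rintro rfl; exact hv hs)]
    · rw [if_neg (by simp [hcm, hs])]
      by_cases hvs : v = s
      · subst hvs
        rw [PySem.Dict.get?_insert_self, PySem.List.index?_append_singleton_self _ _ hs]
        simp
      · rw [PySem.Dict.get?_insert_of_ne _ _ hvs, ih v,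
          index?_append_single xs s v (Or.inr hvs)]

theorem pvFirstIdx_contains (stones : List (List Int)) (v : List Int) :
    (pvFirstIdx stones).contains v = stones.contains v := by
  rw [PySem.Dict.contains_eq_isSome_get?, pvFirstIdx_get?]
  by_cases hv : v ∈ stones
  · have : (PySem.List.index? stones v).isSome = true :=
      (PySem.List.index?_isSome_iff _ _).mpr hv
    rcases h : PySem.List.index? stones v with _ | i
    · rw [h] at this; simp at this
    · simp [h, List.contains_iff_mem, hv]
  · rw [(PySem.List.index?_eq_none_iff _ _).mpr hv]
    simp [List.contains_iff_mem, hv]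

-- if A's pos is a wall, A fails at once, for any fuel
theorem step_left_fuel_wall (f : Nat) (pos : List Int) (stones walls : List (List Int))
    (h : pos ∈ walls) :
    step_left_fuel f pos stones walls = (false, stones) := by
  cases f with
  | zero => rfl
  | succ f =>
    cases pos with
    | nil => rfl
    | cons x t =>
      cases t with
      | nil => rfl
      | cons y t => simp [step_left_fuel, h]

-- a successful scan ends an even number of cells to the left, within the fuel
theorem pvScan_some (first : PySem.Dict (List Int) Int) (walls : List (List Int)) (x : Int) :
    ∀ (f : Nat) (y c : Int), pvScan first walls x f y = some c →
      ∃ m : Nat, y = c + 2 * m ∧ m < f := by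
  intro f
  induction f with
  | zero => intro y c h; simp [pvScan] at h
  | succ f ih =>
    intro y c h
    rw [pvScan] at h
    split at h
    · split at h
      · exact absurd h (by simp)
      · obtain ⟨m, hm, hmf⟩ := ih (y - 2) c h
        exact ⟨m + 1, by push_cast at hm ⊢; omega, by omega⟩
    · simp only [Option.some.injEq] at h
      exact ⟨0, by omega, by omega⟩

-- the shift loop does nothing once cur ≥ y, whatever the fuel
theorem pvShift_stop (first : PySem.Dict (List Int) Int) (x : Int) (f : Nat)
    (ns : List (List Int)) (cur y : Int) (h : ¬ cur < y) :
    pvShift first x f ns cur y = ns := by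
  cases f <;> simp [pvShift, h]

theorem pvShift_succ (first : PySem.Dict (List Int) Int) (x : Int) (f : Nat)
    (ns : List (List Int)) (cur y : Int) :
    pvShift first x (f + 1) ns cur y =
      if cur < y then pvShift first x f (pvShiftStep first x ns cur) (cur + 2) y else ns := rfl

-- peeling the LAST iteration off the shift loop (any sufficient fuel)
theorem pvShift_peel (first : PySem.Dict (List Int) Int) (x : Int) :
    ∀ (m g : Nat) (ns : List (List Int)) (c : Int),
      pvShift first x (m + g + 1) ns c (c + 2 * m + 2) =
        pvShiftStep first x (pvShift first x (m + g) ns c (c + 2 * m)) (c + 2 * m) := by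
  intro m
  induction m with
  | zero =>
    intro g ns c
    have h0 : c + 2 * ((0 : Nat) : Int) = c := by push_cast; ring
    simp only [Nat.zero_add]
    rw [h0, pvShift_stop first x g ns c c (by omega)]
    rw [pvShift_succ, if_pos (by omega)]
    exact pvShift_stop first x g (pvShiftStep first x ns c) (c + 2) (c + 2) (by omega)
  | succ m ih =>
    intro g ns c
    have hf : m + 1 + g = m + g + 1 := by omega
    conv_lhs => rw [pvShift_succ]
    rw [if_pos (by push_cast; omega)]
    have h1 : c + 2 * ((m + 1 : Nat) : Int) + 2 = (c + 2) + 2 * (m : Int) + 2 := by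
      push_cast; ring
    rw [hf, h1, ih g (pvShiftStep first x ns c) (c + 2)]
    have h2 : c + 2 * ((m + 1 : Nat) : Int) = (c + 2) + 2 * (m : Int) := by
      push_cast; ring
    rw [h2]
    conv_rhs => rw [pvShift_succ]
    rw [if_pos (by omega)]

-- main invariant: A's recursion from (x, y) computes what B's scan + shift loop compute
theorem step_left_fuel_eq_scan (stones walls : List (List Int)) (x : Int) :
    ∀ (f : Nat) (y : Int) (rest : List Int),
      (x :: y :: rest) ∉ walls →
      step_left_fuel f (x :: y :: rest) stones walls =
        match pvScan (pvFirstIdx stones) walls x f y with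
        | none => (false, stones)
        | some c => (true, pvShift (pvFirstIdx stones) x f stones c y) := by
  intro f
  induction f with
  | zero => intro y rest hw; rfl
  | succ f ih =>
    intro y rest hw
    by_cases hst : [x, y - 1, y] ∈ stones
    · by_cases hw2 : [x, y - 2] ∈ walls
      · have hA := step_left_fuel_wall f [x, y - 2] stones walls hw2
        simp [step_left_fuel, pvScan, hw, hst, hw2, hA, pvFirstIdx_contains,
          List.contains_iff_mem]
      · have hrec := ih (y - 2) [] hw2
        rcases hscan : pvScan (pvFirstIdx stones) walls x f (y - 2) with _ | c
        · rw [hscan] at hrec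
          simp [step_left_fuel, pvScan, hw, hst, hw2, hrec, hscan, pvFirstIdx_contains,
            List.contains_iff_mem]
        · rw [hscan] at hrec
          have hisome : (PySem.List.index? stones [x, y - 1, y]).isSome = true :=
            (PySem.List.index?_isSome_iff _ _).mpr hst
          rcases hi : PySem.List.index? stones [x, y - 1, y] with _ | i
          · rw [hi] at hisome; simp at hisome
          · have hi' : List.idxOf? [x, y - 1, y] stones = some i := by
              rw [← PySem.List.index?_eq_idxOf?]; exact hi
            have hR : pvScan (pvFirstIdx stones) walls x (f + 1) y = some c := by
              rw [pvScan]
              rw [if_pos (by rw [pvFirstIdx_contains]; exact List.contains_iff_mem.mpr hst),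
                if_neg (by simp [List.contains_iff_mem, hw2]), hscan]
            obtain ⟨m, hm, hmf⟩ := pvScan_some (pvFirstIdx stones) walls x f (y - 2) c hscan
            have hpeel : pvShift (pvFirstIdx stones) x (f + 1) stones c y =
                (pvShift (pvFirstIdx stones) x f stones c (y - 2)).set i [x, y - 2, y - 1] := by
              have hkey : (pvFirstIdx stones).get? [x, (c + 2 * (m : Int)) + 1, (c + 2 * (m : Int)) + 2]
                  = some (Int.ofNat i) := by
                have hk : ([x, (c + 2 * (m : Int)) + 1, (c + 2 * (m : Int)) + 2] : List Int)
                    = [x, y - 1, y] := by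
                  have hy1 : y - 1 = c + 2 * (m : Int) + 1 := by omega
                  have hy0 : y = c + 2 * (m : Int) + 2 := by omega
                  rw [hy1, hy0]
                rw [hk, pvFirstIdx_get?, hi]; rfl
              have h2 : y - 2 = c + 2 * (m : Int) := by omega
              have h1 : y = c + 2 * (m : Int) + 2 := by omega
              have h3 : (c + 2 * (m : Int) + 2) - 1 = c + 2 * (m : Int) + 1 := by omega
              have hf1 : f + 1 = m + (f - m) + 1 := by omega
              have hf2 : f = m + (f - m) := by omega
              rw [h2, h1, hf1, pvShift_peel, pvShiftStep, hkey, h3, ← hf2]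
              simp
            rw [hR]
            simp [step_left_fuel, hw, hst, hrec, hi', hpeel, List.contains_iff_mem]
    · have hR : pvScan (pvFirstIdx stones) walls x (f + 1) y = some y := by
        rw [pvScan, if_neg (by rw [pvFirstIdx_contains]; simp [List.contains_iff_mem, hst])]
      rw [hR]
      have hsh : pvShift (pvFirstIdx stones) x (f + 1) stones y y = stones :=
        pvShift_stop _ _ _ _ _ _ (by omega)
      simp [step_left_fuel, hw, hst, hsh, List.contains_iff_mem]

-- ===== VERDICT (by name: the statement is the Claim_ definition above) =====
theorem step_left_spec : Claim_equal_step_left := by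
  intro pos stones walls _hdom hpre
  unfold Spec_step_left step_left step_left_alt
  match pos, hpre with
  | x :: y :: rest, _ =>
    by_cases hw : (x :: y :: rest) ∈ walls
    · rw [step_left_fuel_wall _ _ _ _ hw]
      simp [hw]
    · rw [step_left_fuel_eq_scan stones walls x (stones.length + 1) y rest hw]
      simp [hw]
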